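-- pv_equiv track=rewrite | github.com/prvn-kumar01/Agentic-Data-Analyst | streamlit_app.py | render_pipeline_status
-- ===== SOURCE A (Python) =====
-- PIPELINE_NODES = [
--     ("📋", "profiler", "Data Profiler"),
--     ("🗺️", "planner", "Analysis Planner"),
--     ("💻", "generator", "Code Generator"),
--     ("⚡", "executor", "Code Executor"),
--     ("🧠", "insight", "Insight Engine"),
-- ]
--
-- def render_pipeline_status(node_log, is_loading):
--     """Render pipeline status as styled HTML."""
--     completed_nodes = {entry.get("node", "") for entry in node_log}
--
--     html = '<div class="section-label">⚙️ Pipeline Status</div>'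
--
--     for icon, node_key, label in PIPELINE_NODES:
--         if node_key in completed_nodes:
--             entry = next((e for e in node_log if e.get("node") == node_key), {})
--             if entry.get("error"):
--                 css_class = "error"
--                 status_icon = "❌"
--             else:
--                 css_class = "completed"
--                 status_icon = "✅"
--         elif is_loading and node_key not in completed_nodes:
--             first_non_completed = None
--             for _, nk, _ in PIPELINE_NODES:
--                 if nk not in completed_nodes:
--                     first_non_completed = nk
--                     break
--             if node_key == first_non_completed:
--                 css_class = "running"
--                 status_icon = "⏳"
--             else:
--                 css_class = "waiting"
--                 status_icon = "○"
--         else: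
--             css_class = "waiting"
--             status_icon = "○"
--
--         html += f'<div class="pipeline-step {css_class}">{status_icon} {icon} {label}</div>'
--
--     return html
-- ===== SOURCE B (Python) =====
-- PIPELINE_NODES = [
--     ("📋", "profiler", "Data Profiler"),
--     ("🗺️", "planner", "Analysis Planner"),
--     ("💻", "generator", "Code Generator"),
--     ("⚡", "executor", "Code Executor"),
--     ("🧠", "insight", "Insight Engine"),
-- ]
--
-- def render_pipeline_status(node_log, is_loading):
--     """Render pipeline status as styled HTML.
--
--     Single recursive pass over PIPELINE_NODES threading a 'running slot still
--     available' flag: no completed-set, no precomputed or recomputed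
--     first-non-completed node -- the first node without a log entry takes the
--     running slot (if loading) and clears the flag for the rest.
--     """
--     def steps(nodes, slot_open):
--         if not nodes:
--             return ""
--         icon, node_key, label = nodes[0]
--         entry = next((e for e in node_log if e.get("node", "") == node_key), None)
--         if entry is not None:
--             css_class, status_icon = ("error", "❌") if entry.get("error") else ("completed", "✅")
--         elif slot_open:
--             css_class, status_icon, slot_open = "running", "⏳", False
--         else:
--             css_class, status_icon = "waiting", "○"
--         return (f'<div class="pipeline-step {css_class}">{status_icon} {icon} {label}</div>'
--                 + steps(nodes[1:], slot_open))
--     return '<div class="section-label">⚙️ Pipeline Status</div>' + steps(PIPELINE_NODES, is_loading)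
-- ===== Notes on version B (the rewrite author's own statement) =====
-- stated objective: alternative
-- what changed: B is a single recursive pass over PIPELINE_NODES that threads a 'running slot still available' flag through the recursion, so the first node lacking a log entry becomes 'running' by consuming the flag; this eliminates A's completed-nodes set and A's per-iteration nested re-scan of PIPELINE_NODES that recomputes the first non-completed node.
import Mathlib
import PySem

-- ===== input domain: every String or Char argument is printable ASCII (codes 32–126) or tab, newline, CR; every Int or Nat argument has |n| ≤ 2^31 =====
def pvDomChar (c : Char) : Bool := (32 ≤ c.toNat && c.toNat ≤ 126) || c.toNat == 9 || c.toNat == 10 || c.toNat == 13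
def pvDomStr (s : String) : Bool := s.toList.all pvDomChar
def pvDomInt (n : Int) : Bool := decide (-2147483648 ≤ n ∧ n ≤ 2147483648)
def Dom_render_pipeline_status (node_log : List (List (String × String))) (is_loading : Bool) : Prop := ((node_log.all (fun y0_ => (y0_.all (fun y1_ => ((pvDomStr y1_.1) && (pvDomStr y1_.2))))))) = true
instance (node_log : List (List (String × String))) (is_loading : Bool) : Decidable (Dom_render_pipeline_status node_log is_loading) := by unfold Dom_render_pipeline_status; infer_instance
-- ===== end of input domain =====

-- B renders in one recursive pass threading a 'running slot available' flag, replacing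
-- A's completed-set plus nested first-non-completed re-scan (objective: alternative).

-- ===== PORT A =====
def PIPELINE_NODES : List (String × String × String) :=
  [("📋", "profiler", "Data Profiler"),
   ("🗺️", "planner", "Analysis Planner"),
   ("💻", "generator", "Code Generator"),
   ("⚡", "executor", "Code Executor"),
   ("🧠", "insight", "Insight Engine")]

-- e.get("node", "") on a dict-entry
def pvEntryKey (e : List (String × String)) : String := (PySem.Dict.mk e).getD "node" ""

def render_pipeline_status (node_log : List (List (String × String))) (is_loading : Bool) : String :=
  let completed : PySem.Set String := PySem.Set.ofList (node_log.map pvEntryKey)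
  PIPELINE_NODES.foldl (fun html p =>
    let cs :=
      if PySem.Set.contains completed p.2.1 then
        -- next((e for e in node_log if e.get("node") == node_key), {})
        let entry := (node_log.find? (fun e => (PySem.Dict.mk e).get? "node" == some p.2.1)).getD []
        if ((PySem.Dict.mk entry).getD "error" "") ≠ "" then ("error", "❌")
        else ("completed", "✅")
      else if is_loading && !(PySem.Set.contains completed p.2.1) then
        -- inner for-loop with break = first node not in completed
        let first_non_completed :=
          (PIPELINE_NODES.find? (fun q => !(PySem.Set.contains completed q.2.1))).map (fun q => q.2.1)
        if first_non_completed == some p.2.1 then ("running", "⏳") else ("waiting", "○")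
      else ("waiting", "○")
    html ++ "<div class=\"pipeline-step " ++ cs.1 ++ "\">" ++ cs.2 ++ " " ++ p.1 ++ " " ++ p.2.2 ++ "</div>")
    "<div class=\"section-label\">⚙️ Pipeline Status</div>"

-- ===== PORT B =====
-- next((e for e in node_log if e.get("node", "") == node_key), None)
def pvFind (node_log : List (List (String × String))) (k : String) :
    Option (List (String × String)) :=
  node_log.find? (fun e => (PySem.Dict.mk e).getD "node" "" == k)

-- the inner recursive 'steps(nodes, slot_open)' of Source B
def pvSteps (node_log : List (List (String × String))) :
    List (String × String × String) → Bool → String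
  | [], _ => ""
  | (icon, node_key, label) :: rest, slot_open =>
    let st :=
      match pvFind node_log node_key with
      | some entry =>
          if ((PySem.Dict.mk entry).getD "error" "") ≠ "" then ("error", "❌", slot_open)
          else ("completed", "✅", slot_open)
      | none =>
          if slot_open then ("running", "⏳", false) else ("waiting", "○", slot_open)
    "<div class=\"pipeline-step " ++ st.1 ++ "\">" ++ st.2.1 ++ " " ++ icon ++ " " ++ label ++ "</div>"
      ++ pvSteps node_log rest st.2.2

def render_pipeline_status_alt (node_log : List (List (String × String))) (is_loading : Bool) : String :=
  "<div class=\"section-label\">⚙️ Pipeline Status</div>" ++ pvSteps node_log PIPELINE_NODES is_loading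

-- ===== PRECONDITION & SPEC =====
def Spec_render_pipeline_status (node_log : List (List (String × String))) (is_loading : Bool) (out : String) : Prop := out = render_pipeline_status_alt node_log is_loading
instance (node_log : List (List (String × String))) (is_loading : Bool) (out : String) : Decidable (Spec_render_pipeline_status node_log is_loading out) := by unfold Spec_render_pipeline_status; infer_instance

-- ===== CLAIM (what is proved, stated in full; the proofs are below) =====
def Claim_equal_render_pipeline_status : Prop := ∀ (node_log : List (List (String × String))) (is_loading : Bool), Dom_render_pipeline_status node_log is_loading → Spec_render_pipeline_status node_log is_loading (render_pipeline_status node_log is_loading)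

-- ===== LEMMAS AND PROOFS =====

-- A's set membership test equals 'B's lookup found something'
theorem pv_contains_eq (log : List (List (String × String))) (k : String) :
    PySem.Set.contains (PySem.Set.ofList (log.map pvEntryKey)) k = (pvFind log k).isSome := by
  rw [Bool.eq_iff_iff, PySem.Set.contains_iff, pvFind, List.find?_isSome]
  simp only [PySem.Set.mem_ofList, List.mem_map, pvEntryKey, beq_iff_eq]

-- A's entry lookup (get? "node" == some k) equals B's (getD "node" "" == k) for k ≠ ""
theorem pv_find_eq (log : List (List (String × String))) (k : String) (hk : k ≠ "") :
    log.find? (fun e => (PySem.Dict.mk e).get? "node" == some k) = pvFind log k := by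
  unfold pvFind
  congr 1
  funext e
  rw [PySem.Dict.getD_eq_get?_getD]
  cases (PySem.Dict.mk e).get? "node" with
  | none => simp [Ne.symm hk]
  | some v => simp

-- A's loop body after the two rewrites above (lookup in pvFind form; F = A's fixed
-- first_non_completed value)
def pvAbody (log : List (List (String × String))) (il : Bool) (F : Option String)
    (html : String) (p : String × String × String) : String :=
  let cs :=
    if (pvFind log p.2.1).isSome then
      let entry := (pvFind log p.2.1).getD []
      if ((PySem.Dict.mk entry).getD "error" "") ≠ "" then ("error", "❌")
      else ("completed", "✅")
    else if il && !(pvFind log p.2.1).isSome then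
      if F == some p.2.1 then ("running", "⏳") else ("waiting", "○")
    else ("waiting", "○")
  html ++ "<div class=\"pipeline-step " ++ cs.1 ++ "\">" ++ cs.2 ++ " " ++ p.1 ++ " " ++ p.2.2 ++ "</div>"

-- invariant: B's slot flag b means "F is exactly the first non-completed key of the
-- remaining nodes and we are loading"; with b off, no remaining node can be running
theorem pv_loop (log : List (List (String × String))) (il : Bool) (F : Option String) :
    ∀ (nodes : List (String × String × String)) (b : Bool) (acc : String),
      (nodes.map (fun p => p.2.1)).Nodup →
      (b = true → il = true ∧
        F = (nodes.find? (fun q => !(pvFind log q.2.1).isSome)).map (fun q => q.2.1)) →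
      (b = false → ∀ p ∈ nodes, (pvFind log p.2.1).isSome = false →
        (il && (F == some p.2.1)) = false) →
      nodes.foldl (pvAbody log il F) acc = acc ++ pvSteps log nodes b := by
  intro nodes
  induction nodes with
  | nil => intro b acc _ _ _; simp [pvSteps]
  | cons hd rest ih =>
    intro b acc hnd h1 h0
    obtain ⟨icon, k, label⟩ := hd
    rw [List.map_cons] at hnd
    have hndr : (rest.map (fun p => p.2.1)).Nodup := hnd.of_cons
    have hknm : k ∉ rest.map (fun p => p.2.1) := (List.nodup_cons.mp hnd).1
    rw [List.foldl_cons]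
    cases he : pvFind log k with
    | some e =>
      have hrec := ih b (pvAbody log il F acc (icon, k, label))
        hndr
        (by intro hb; obtain ⟨hil, hF⟩ := h1 hb
            refine ⟨hil, ?_⟩
            rw [hF, List.find?_cons_of_neg]; simp [he])
        (by intro hb p hp hc; exact h0 hb p (List.mem_cons_of_mem _ hp) hc)
      rw [hrec, pvSteps, he]
      simp only [pvAbody, he, Option.isSome_some, Option.getD_some]
      split_ifs <;> simp [String.append_assoc]
    | none =>
      cases b with
      | true =>
        obtain ⟨hil, hF⟩ := h1 rfl
        have hFk : F = some k := by
          rw [hF, List.find?_cons_of_pos]; · rfl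
          · simp [he]
        have hrec := ih false (pvAbody log il F acc (icon, k, label))
          hndr
          (by intro h; cases h)
          (by intro _ p hp hc
              have hne : p.2.1 ≠ k := by
                intro hkk
                have hm : p.2.1 ∈ rest.map (fun p => p.2.1) := List.mem_map_of_mem hp
                rw [hkk] at hm
                exact hknm hm
              simp [hFk, Ne.symm hne])
        rw [hrec, pvSteps, he]
        simp only [pvAbody, he, hil, hFk, Option.isSome_none, Bool.not_false,
          Bool.true_and, if_neg (by simp : ¬ (false = true))]
        simp [String.append_assoc]
      | false =>
        have hrun : (il && (F == some k)) = false :=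
          h0 rfl (icon, k, label) (List.mem_cons_self) (by simp [he])
        have hrec := ih false (pvAbody log il F acc (icon, k, label))
          hndr
          (by intro h; cases h)
          (by intro _ p hp hc; exact h0 rfl p (List.mem_cons_of_mem _ hp) hc)
        rw [hrec, pvSteps, he]
        simp only [pvAbody, he, Option.isSome_none]
        rcases Bool.and_eq_false_iff.mp hrun with hil | hne
        · simp [hil, String.append_assoc]
        · cases hil : il <;> simp [hne, String.append_assoc]

-- A's fold body equals pvAbody on the pipeline nodes (whose keys are nonempty)
theorem pv_body_eq (log : List (List (String × String))) (il : Bool) (acc : String)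
    (p : String × String × String) (hp : p ∈ PIPELINE_NODES) :
    (fun html (q : String × String × String) =>
      let cs :=
        if PySem.Set.contains (PySem.Set.ofList (log.map pvEntryKey)) q.2.1 then
          let entry := (log.find? (fun e => (PySem.Dict.mk e).get? "node" == some q.2.1)).getD []
          if ((PySem.Dict.mk entry).getD "error" "") ≠ "" then ("error", "❌")
          else ("completed", "✅")
        else if il && !(PySem.Set.contains (PySem.Set.ofList (log.map pvEntryKey)) q.2.1) then
          let first_non_completed :=
            (PIPELINE_NODES.find? (fun q => !(PySem.Set.contains (PySem.Set.ofList (log.map pvEntryKey)) q.2.1))).map (fun q => q.2.1)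
          if first_non_completed == some q.2.1 then ("running", "⏳") else ("waiting", "○")
        else ("waiting", "○")
      html ++ "<div class=\"pipeline-step " ++ cs.1 ++ "\">" ++ cs.2 ++ " " ++ q.1 ++ " " ++ q.2.2 ++ "</div>") acc p
      = pvAbody log il
          ((PIPELINE_NODES.find? (fun q => !(pvFind log q.2.1).isSome)).map (fun q => q.2.1)) acc p := by
  fin_cases hp <;>
    simp only [pvAbody, pv_contains_eq,
      pv_find_eq log "profiler" (by decide), pv_find_eq log "planner" (by decide),
      pv_find_eq log "generator" (by decide), pv_find_eq log "executor" (by decide),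
      pv_find_eq log "insight" (by decide)]

-- ===== VERDICT (by name: the statement is the Claim_ definition above) =====
theorem render_pipeline_status_spec : Claim_equal_render_pipeline_status := by
  intro log il _
  unfold Spec_render_pipeline_status render_pipeline_status render_pipeline_status_alt
  show List.foldl
      (fun html (q : String × String × String) =>
        let cs :=
          if PySem.Set.contains (PySem.Set.ofList (log.map pvEntryKey)) q.2.1 then
            let entry := (log.find? (fun e => (PySem.Dict.mk e).get? "node" == some q.2.1)).getD []
            if ((PySem.Dict.mk entry).getD "error" "") ≠ "" then ("error", "❌")
            else ("completed", "✅")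
          else if il && !(PySem.Set.contains (PySem.Set.ofList (log.map pvEntryKey)) q.2.1) then
            let first_non_completed :=
              (PIPELINE_NODES.find? (fun q => !(PySem.Set.contains (PySem.Set.ofList (log.map pvEntryKey)) q.2.1))).map (fun q => q.2.1)
            if first_non_completed == some q.2.1 then ("running", "⏳") else ("waiting", "○")
          else ("waiting", "○")
        html ++ "<div class=\"pipeline-step " ++ cs.1 ++ "\">" ++ cs.2 ++ " " ++ q.1 ++ " " ++ q.2.2 ++ "</div>")
      "<div class=\"section-label\">⚙️ Pipeline Status</div>" PIPELINE_NODES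
    = "<div class=\"section-label\">⚙️ Pipeline Status</div>" ++ pvSteps log PIPELINE_NODES il
  refine Eq.trans (PySem.List.foldl_congr_mem _ _ _ _ (fun acc p hp => pv_body_eq log il acc p hp)) ?_
  exact pv_loop log il _ PIPELINE_NODES il _
    (by decide)
    (fun h => ⟨h, rfl⟩)
    (by intro hil _ _ _; simp [hil])
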